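-- pv_equiv track=rewrite | github.com/righthand0521/LeetCode | src/648.py | shortest_root
-- ===== SOURCE A (Python) =====
-- def shortest_root(word: str, dict_set: set) -> str:
--     retVal = word   # There is not a corresponding root in the dictionary
--
--     wordSize = len(word)
--     for i in range(wordSize):  # Find the shortest root of the word in the dictionary
--         root = word[0:i]
--         if root in dict_set:
--             retVal = root
--             break
--
--     return retVal
-- ===== SOURCE B (Python) =====
-- def shortest_root(word: str, dict_set: set) -> str:
--     best = word
--     for root in dict_set:
--         if len(root) < len(best) and word.startswith(root):
--             best = root
--     return best
-- ===== Notes on version B (the rewrite author's own statement) =====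
-- stated objective: alternative
-- what changed: B iterates over the dictionary roots keeping the shortest root that is a prefix of word, instead of A's scan over prefix lengths of word with set membership tests; equal because prefixes of a fixed length are unique and the only full-length prefix is word itself, A's default.
import Mathlib
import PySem

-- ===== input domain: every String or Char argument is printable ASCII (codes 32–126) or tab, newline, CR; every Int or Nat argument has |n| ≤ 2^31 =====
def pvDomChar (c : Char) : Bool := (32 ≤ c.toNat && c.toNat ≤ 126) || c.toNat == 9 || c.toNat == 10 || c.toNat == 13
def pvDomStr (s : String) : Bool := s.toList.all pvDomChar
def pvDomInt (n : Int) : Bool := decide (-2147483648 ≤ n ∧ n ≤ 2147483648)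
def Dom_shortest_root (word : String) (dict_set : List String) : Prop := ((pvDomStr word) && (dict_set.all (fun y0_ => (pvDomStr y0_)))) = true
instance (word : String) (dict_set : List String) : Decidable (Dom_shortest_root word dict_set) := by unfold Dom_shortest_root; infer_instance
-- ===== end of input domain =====

-- B iterates over the dictionary roots keeping the shortest one that is a prefix of word,
-- instead of A's scan over prefix lengths with set-membership tests (alternative decomposition).


-- ===== PORT A =====
-- the 'for i in range(wordSize): … break' loop, as structural recursion over the range list
def shortest_rootLoop (word : String) (dict_set : List String) : List Int → String
  | [] => word
  | i :: rest =>
    let root := PySem.Str.slice word (some 0) (some i)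
    if dict_set.contains root then root else shortest_rootLoop word dict_set rest

def shortest_root (word : String) (dict_set : List String) : String :=
  shortest_rootLoop word dict_set (PySem.List.pyRange 0 (PySem.Str.len word) 1)

-- ===== PORT B =====
def shortest_root_alt (word : String) (dict_set : List String) : String :=
  dict_set.foldl
    (fun best root =>
      if PySem.Str.len root < PySem.Str.len best ∧ PySem.Str.startswith word root = true
      then root else best)
    word

-- ===== PRECONDITION & SPEC =====
def Spec_shortest_root (word : String) (dict_set : List String) (out : String) : Prop := out = shortest_root_alt word dict_set
instance (word : String) (dict_set : List String) (out : String) : Decidable (Spec_shortest_root word dict_set out) := by unfold Spec_shortest_root; infer_instance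

-- ===== CLAIM (what is proved, stated in full; the proofs are below) =====
def Claim_equal_shortest_root : Prop := ∀ (word : String) (dict_set : List String), Dom_shortest_root word dict_set → Spec_shortest_root word dict_set (shortest_root word dict_set)

-- ===== LEMMAS AND PROOFS =====

-- word[0:i] for 0 ≤ i is take i of the character list
lemma slice_prefix_toList (s : String) (i : Int) (h : 0 ≤ i) :
    (PySem.Str.slice s (some 0) (some i)).toList = s.toList.take i.toNat := by
  simp [PySem.Str.slice, PySem.Chars.slice, PySem.List.slice_zero_start, PySem.List.slice_to _ h]

-- A's loop over range(a, len word) returns word if no prefix of length in [a, n) is in the set,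
-- else the first (shortest) such prefix
lemma shortest_rootLoop_char (word : String) (ds : List String) (a : Int) (ha : 0 ≤ a) :
    (shortest_rootLoop word ds (PySem.List.pyRange a (PySem.Str.len word) 1) = word ∧
      ∀ i : Int, a ≤ i → i < PySem.Str.len word →
        PySem.Str.slice word (some 0) (some i) ∉ ds) ∨
    (∃ i : Int, a ≤ i ∧ i < PySem.Str.len word ∧
      shortest_rootLoop word ds (PySem.List.pyRange a (PySem.Str.len word) 1) =
        PySem.Str.slice word (some 0) (some i) ∧
      PySem.Str.slice word (some 0) (some i) ∈ ds ∧
      ∀ j : Int, a ≤ j → j < i → PySem.Str.slice word (some 0) (some j) ∉ ds) := by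
  by_cases hlt : a < PySem.Str.len word
  · rw [PySem.List.pyRange_one_cons hlt]
    simp only [shortest_rootLoop]
    by_cases hc : ds.contains (PySem.Str.slice word (some 0) (some a)) = true
    · rw [if_pos hc]
      right
      exact ⟨a, le_rfl, hlt, rfl, List.contains_iff_mem.mp hc,
        fun j h1 h2 => absurd (lt_of_le_of_lt h1 h2) (lt_irrefl a)⟩
    · rw [if_neg hc]
      have hmemA : PySem.Str.slice word (some 0) (some a) ∉ ds := by
        intro h; exact hc (List.contains_iff_mem.mpr h)
      rcases shortest_rootLoop_char word ds (a + 1) (by omega) with ⟨hw, hno⟩ | ⟨i, h1, h2, h3, h4, h5⟩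
      · left
        refine ⟨hw, fun i hi1 hi2 => ?_⟩
        rcases eq_or_lt_of_le hi1 with h | h
        · rw [← h]; exact hmemA
        · exact hno i (by omega) hi2
      · right
        refine ⟨i, by omega, h2, h3, h4, fun j hj1 hj2 => ?_⟩
        rcases eq_or_lt_of_le hj1 with h | h
        · rw [← h]; exact hmemA
        · exact h5 j (by omega) hj2
  · left
    rw [PySem.List.pyRange_one_eq_nil (by omega)]
    exact ⟨rfl, fun i h1 h2 => absurd h2 (by omega)⟩
termination_by (PySem.Str.len word - a).toNat

-- B's fold invariant
lemma fold_inv (word : String) (ds : List String) (best : String)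
    (hb : best.toList <+: word.toList) :
    (ds.foldl (fun best root =>
      if PySem.Str.len root < PySem.Str.len best ∧ PySem.Str.startswith word root = true
      then root else best) best).toList <+: word.toList ∧
    (ds.foldl (fun best root =>
      if PySem.Str.len root < PySem.Str.len best ∧ PySem.Str.startswith word root = true
      then root else best) best).toList.length ≤ best.toList.length ∧
    ((ds.foldl (fun best root =>
      if PySem.Str.len root < PySem.Str.len best ∧ PySem.Str.startswith word root = true
      then root else best) best) = best ∨
     (ds.foldl (fun best root =>
      if PySem.Str.len root < PySem.Str.len best ∧ PySem.Str.startswith word root = true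
      then root else best) best) ∈ ds) ∧
    ∀ m ∈ ds, m.toList <+: word.toList →
      (ds.foldl (fun best root =>
        if PySem.Str.len root < PySem.Str.len best ∧ PySem.Str.startswith word root = true
        then root else best) best).toList.length ≤ m.toList.length := by
  induction ds generalizing best with
  | nil => exact ⟨hb, le_rfl, Or.inl rfl, by simp⟩
  | cons x rest ih =>
    simp only [List.foldl_cons]
    by_cases hx : PySem.Str.len x < PySem.Str.len best ∧ PySem.Str.startswith word x = true
    · rw [if_pos hx]
      have hxp : x.toList <+: word.toList := by
        have := hx.2
        rw [PySem.Str.startswith_eq] at this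
        exact (PySem.Chars.startswith_iff _ _).mp this
      obtain ⟨p1, p2, p3, p4⟩ := ih x hxp
      have hlen : x.toList.length < best.toList.length := by
        have := hx.1
        simp only [PySem.Str.len_eq] at this
        exact_mod_cast this
      refine ⟨p1, by omega, ?_, ?_⟩
      · rcases p3 with h | h
        · right; rw [h]; exact List.mem_cons_self
        · exact Or.inr (List.mem_cons_of_mem _ h)
      · intro m hm hmp
        rcases List.mem_cons.mp hm with h | h
        · subst h; exact p2
        · exact p4 m h hmp
    · rw [if_neg hx]
      obtain ⟨p1, p2, p3, p4⟩ := ih best hb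
      refine ⟨p1, p2, ?_, ?_⟩
      · rcases p3 with h | h
        · exact Or.inl h
        · exact Or.inr (List.mem_cons_of_mem _ h)
      · intro m hm hmp
        rcases List.mem_cons.mp hm with h | h
        · subst h
          have hsw : PySem.Str.startswith word m = true := by
            rw [PySem.Str.startswith_eq]
            exact (PySem.Chars.startswith_iff _ _).mpr hmp
          have hnl : ¬ PySem.Str.len m < PySem.Str.len best := fun hl => hx ⟨hl, hsw⟩
          simp only [PySem.Str.len_eq] at hnl
          have : best.toList.length ≤ m.toList.length := by exact_mod_cast not_lt.mp hnl
          omega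
        · exact p4 m h hmp

-- ===== VERDICT (by name: the statement is the Claim_ definition above) =====
-- a prefix r of word equals the slice word[0:len(r)]
lemma slice_of_prefix (word r : String) (h : r.toList <+: word.toList) :
    PySem.Str.slice word (some 0) (some (r.toList.length : Int)) = r := by
  apply String.toList_inj.mp
  rw [slice_prefix_toList _ _ (by positivity)]
  simp only [Int.toNat_natCast]
  exact (List.prefix_iff_eq_take.mp h).symm

-- ===== VERDICT (by name: the statement is the Claim_ definition above) =====
theorem shortest_root_spec : Claim_equal_shortest_root := by
  unfold Claim_equal_shortest_root
  intro word ds _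
  unfold Spec_shortest_root shortest_root shortest_root_alt
  obtain ⟨q1, q2, q3, q4⟩ := fold_inv word ds word List.prefix_rfl
  set rB := ds.foldl (fun best root =>
      if PySem.Str.len root < PySem.Str.len best ∧ PySem.Str.startswith word root = true
      then root else best) word with hrB
  rcases shortest_rootLoop_char word ds 0 le_rfl with ⟨hw, hno⟩ | ⟨i, h0, hin, hr, hmem, hmin⟩
  · -- A returns word; show B does too
    rw [hw]
    rcases q3 with h | h
    · exact h.symm
    · -- rB ∈ ds
      by_cases hlt : rB.toList.length < word.toList.length
      · exfalso
        apply hno (rB.toList.length : Int) (by positivity)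
          (by rw [PySem.Str.len_eq]; exact_mod_cast hlt)
        rw [slice_of_prefix word rB q1]
        exact h
      · have : rB.toList.length = word.toList.length :=
          le_antisymm (List.IsPrefix.length_le q1) (not_lt.mp hlt)
        exact (String.toList_inj.mp (List.IsPrefix.eq_of_length q1 this)).symm
  · -- A returns the shortest matching proper prefix
    rw [hr]
    have hn : i < (word.toList.length : Int) := by rwa [PySem.Str.len_eq] at hin
    have hAlist : (PySem.Str.slice word (some 0) (some i)).toList = word.toList.take i.toNat :=
      slice_prefix_toList word i h0
    have hAlen : (PySem.Str.slice word (some 0) (some i)).toList.length = i.toNat := by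
      rw [hAlist, List.length_take]; omega
    have hAp : (PySem.Str.slice word (some 0) (some i)).toList <+: word.toList := by
      rw [hAlist]; exact List.take_prefix _ _
    have hle : rB.toList.length ≤ i.toNat := by
      have := q4 _ hmem hAp
      omega
    have hBne : rB ≠ word := by
      intro h
      have : rB.toList.length = word.toList.length := by rw [h]
      omega
    have hBmem : rB ∈ ds := by
      rcases q3 with h | h
      · exact absurd h hBne
      · exact h
    have hge : i.toNat ≤ rB.toList.length := by
      by_contra hcon
      apply hmin (rB.toList.length : Int) (by positivity) (by omega)
      rw [slice_of_prefix word rB q1]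
      exact hBmem
    have hlen : (PySem.Str.slice word (some 0) (some i)).toList.length = rB.toList.length := by
      omega
    exact String.toList_inj.mp
      ((List.prefix_iff_eq_take.mp hAp).trans
        ((hlen ▸ List.prefix_iff_eq_take.mp q1).symm))
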